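-- pv_equiv track=rewrite | github.com/ImLJS/dsa | arrays_strings/algorithms/sliding_window_variable.py | slidingWindowVariable
-- ===== SOURCE A (Python) =====
-- def slidingWindowVariable(nums):
--     n = len(nums)
--     maxL = 0
--     L = 0
--
--     for R in range(n):
--         if nums[L] != nums[R]:  # If the elements are not equal
--             L = R
--         maxL = max(maxL, R - L + 1)  # Update the maximum length
--     return maxL
-- ===== SOURCE B (Python) =====
-- def slidingWindowVariable(nums):
--     # Stage 1: build a run-length encoding of nums as (value, count) pairs.
--     runs = []
--     for x in nums:
--         if runs and runs[-1][0] == x: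
--             runs[-1] = (runs[-1][0], runs[-1][1] + 1)
--         else:
--             runs.append((x, 1))
--     # Stage 2: reduce over the counts; empty input yields 0.
--     return max((c for _, c in runs), default=0)
-- ===== Notes on version B (the rewrite author's own statement) =====
-- stated objective: alternative
-- what changed: Replaced the single-pass two-pointer window by two staged passes: first materialize a run-length encoding of the list as (value, count) pairs, then reduce the counts with max (default 0).
import Mathlib
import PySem

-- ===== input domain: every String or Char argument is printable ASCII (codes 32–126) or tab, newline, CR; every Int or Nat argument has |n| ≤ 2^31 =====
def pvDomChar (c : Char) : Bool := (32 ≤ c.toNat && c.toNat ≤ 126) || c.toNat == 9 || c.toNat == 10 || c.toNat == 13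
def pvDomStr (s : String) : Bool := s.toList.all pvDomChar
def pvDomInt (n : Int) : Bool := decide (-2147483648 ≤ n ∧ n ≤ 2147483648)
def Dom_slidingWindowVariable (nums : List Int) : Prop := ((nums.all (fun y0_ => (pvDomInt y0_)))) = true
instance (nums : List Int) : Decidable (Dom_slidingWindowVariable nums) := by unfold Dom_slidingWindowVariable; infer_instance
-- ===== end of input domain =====

-- B replaces A's single-pass two-pointer window by two staged passes: build a
-- run-length encoding of the list, then reduce the counts with max; an
-- alternative decomposition, not faster.

-- ===== PORT A =====
-- loop body of A: st = (maxL, L), R the loop index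
def stepA (nums : List Int) (st : Int × Int) (R : Int) : Int × Int :=
  let L : Int := if PySem.List.pyGetD nums st.2 0 ≠ PySem.List.pyGetD nums R 0 then R else st.2
  (max st.1 (R - L + 1), L)

def slidingWindowVariable (nums : List Int) : Int :=
  let n : Int := nums.length
  ((PySem.List.pyRange 0 n 1).foldl (stepA nums) (0, 0)).1

-- ===== PORT B =====
-- loop body of Source B stage 1: 'runs[-1] = (v, c+1)' is dropLast ++ [(v, c+1)],
-- 'runs.append((x, 1))' is runs ++ [(x, 1)]
def rleStep (runs : List (Int × Int)) (x : Int) : List (Int × Int) :=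
  match runs.getLast? with
  | some (v, c) => if v = x then runs.dropLast ++ [(v, c + 1)] else runs ++ [(x, 1)]
  | none => [(x, 1)]

-- stage 2: max over the counts with default 0
def slidingWindowVariable_alt (nums : List Int) : Int :=
  ((nums.foldl rleStep []).map Prod.snd).foldl max 0

-- ===== PRECONDITION & SPEC =====
def Spec_slidingWindowVariable (nums : List Int) (out : Int) : Prop := out = slidingWindowVariable_alt nums
instance (nums : List Int) (out : Int) : Decidable (Spec_slidingWindowVariable nums out) := by unfold Spec_slidingWindowVariable; infer_instance

-- ===== CLAIM (what is proved, stated in full; the proofs are below) =====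
def Claim_equal_slidingWindowVariable : Prop := ∀ (nums : List Int), Dom_slidingWindowVariable nums → Spec_slidingWindowVariable nums (slidingWindowVariable nums)

-- ===== LEMMAS AND PROOFS =====

-- proof-only reference: run-by-run scan of the maximum run length
def altGo : List Int → Int → Int
  | [], best => best
  | x :: xs, best =>
    let k : Int := 1 + (xs.takeWhile (fun y => y == x)).length
    altGo (xs.dropWhile (fun y => y == x)) (if k > best then k else best)
termination_by l _ => l.length
decreasing_by simpa using Nat.lt_succ_of_le (List.length_dropWhile_le _ _)

-- proof-only reference: recursive run-length encoding
def rle : List Int → List (Int × Int)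
  | [] => []
  | x :: xs => (x, 1 + (xs.takeWhile (fun y => y == x)).length) :: rle (xs.dropWhile (fun y => y == x))
termination_by l => l.length
decreasing_by simpa using Nat.lt_succ_of_le (List.length_dropWhile_le _ _)

-- proof-only reference: element-wise running-run counter
def go2 : List Int → Int → Int → Int → Int
  | [], _, _, best => best
  | y :: ys, prev, cur, best =>
    if y = prev then go2 ys y (cur + 1) (max best (cur + 1))
    else go2 ys y 1 (max best 1)

theorem altGo_max (xs : List Int) (x cur best : Int) (h : cur ≤ best) :
    go2 xs x cur best
      = altGo (xs.dropWhile (fun y => y == x))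
          (max best (cur + (xs.takeWhile (fun y => y == x)).length)) := by
  induction xs generalizing x cur best with
  | nil => simp [go2, altGo]; omega
  | cons y ys ih =>
    by_cases hyx : y = x
    · subst hyx
      simp only [go2, List.takeWhile_cons, List.dropWhile_cons, beq_self_eq_true,
        if_pos trivial, List.length_cons]
      rw [ih y (cur + 1) (max best (cur + 1)) (le_max_right _ _)]
      congr 1
      push_cast
      omega
    · have hb : (y == x) = false := by simp [hyx]
      simp only [go2, if_neg hyx, List.takeWhile_cons, List.dropWhile_cons, hb,
        Bool.false_eq_true, if_false, List.length_nil, Nat.cast_zero, add_zero]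
      rw [ih y 1 (max best 1) (by omega)]
      simp only [altGo]
      congr 1
      split_ifs <;> omega

theorem stepA_of_eq (nums : List Int) (m L R : Int)
    (h : PySem.List.pyGetD nums L 0 = PySem.List.pyGetD nums R 0) :
    stepA nums (m, L) R = (max m (R - L + 1), L) := by
  simp [stepA, h]

theorem stepA_of_ne (nums : List Int) (m L R : Int)
    (h : PySem.List.pyGetD nums L 0 ≠ PySem.List.pyGetD nums R 0) :
    stepA nums (m, L) R = (max m 1, R) := by
  simp [stepA, h]

theorem A_inv (nums : List Int) :
    ∀ (fuel : Nat) (k L m : Int), ((nums.length : Int) - k).toNat = fuel →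
    0 ≤ L → L < k → k ≤ nums.length →
    PySem.List.pyGetD nums L 0 = PySem.List.pyGetD nums (k - 1) 0 →
    k - L ≤ m →
    ((PySem.List.pyRange k nums.length 1).foldl (stepA nums) (m, L)).1
      = go2 (nums.drop k.toNat) (PySem.List.pyGetD nums (k - 1) 0) (k - L) m := by
  intro fuel
  induction fuel with
  | zero =>
    intro k L m hf h0 hLk hk hprev hm
    rw [PySem.List.pyRange_one_eq_nil (by omega), List.drop_eq_nil_of_le (by omega)]
    simp [go2]
  | succ f ihf =>
    intro k L m hf h0 hLk hk hprev hm
    have hkn : k < (nums.length : Int) := by omega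
    have hklt : k.toNat < nums.length := by omega
    have hgetk : PySem.List.pyGetD nums k 0 = nums[k.toNat] := by
      rw [PySem.List.pyGetD_eq_getElem (h0 := by omega) (h1 := hkn)]

    rw [PySem.List.pyRange_one_cons hkn, List.foldl_cons,
      List.drop_eq_getElem_cons hklt]
    by_cases hEq : PySem.List.pyGetD nums L 0 = PySem.List.pyGetD nums k 0
    · rw [stepA_of_eq nums m L k hEq,
        ihf (k + 1) L (max m (k - L + 1)) (by omega) h0 (by omega) (by omega)
          (by rw [show k + 1 - 1 = k by ring]; exact hEq) (by omega)]
      rw [show k + 1 - 1 = k by ring, show (k + 1).toNat = k.toNat + 1 by omega, hgetk]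
      have hy : nums[k.toNat] = PySem.List.pyGetD nums (k - 1) 0 := by
        rw [← hgetk, ← hEq, hprev]
      conv_rhs => rw [go2, if_pos hy]
      rw [hy, show k + 1 - L = k - L + 1 by ring]
    · rw [stepA_of_ne nums m L k hEq,
        ihf (k + 1) k (max m 1) (by omega) (by omega) (by omega) (by omega)
          (by rw [show k + 1 - 1 = k by ring]) (by omega)]
      rw [show k + 1 - 1 = k by ring, show (k + 1).toNat = k.toNat + 1 by omega, hgetk]
      have hy : nums[k.toNat] ≠ PySem.List.pyGetD nums (k - 1) 0 := by
        rw [← hgetk, ← hprev]; exact fun h => hEq h.symm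
      conv_rhs => rw [go2, if_neg hy]
      rw [show k + 1 - k = 1 by ring]

-- A (via go2) equals altGo
theorem A_altGo (nums : List Int) : slidingWindowVariable nums = altGo nums 0 := by
  cases nums with
  | nil =>
    simp [slidingWindowVariable, altGo,
      PySem.List.pyRange_one_eq_nil (le_refl (0 : Int))]
  | cons x xs =>
    simp only [slidingWindowVariable]
    rw [PySem.List.pyRange_one_cons (by simp), List.foldl_cons,
      stepA_of_eq (x :: xs) 0 0 0 rfl]
    rw [show max (0 : Int) (0 - 0 + 1) = 1 by omega, show (0 : Int) + 1 = 1 by ring]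
    rw [A_inv (x :: xs) ((((x :: xs).length : Int) - 1).toNat) 1 0 1 rfl (le_refl 0)
      (by omega) (by simp) (by norm_num) (by omega)]
    rw [show (1 : Int) - 1 = 0 by ring, show (1 : Int).toNat = 1 by rfl,
      show (1 : Int) - 0 = 1 by ring, List.drop_one, List.tail_cons,
      PySem.List.pyGetD_zero_cons]
    rw [altGo_max xs x 1 1 (le_refl 1)]
    conv_rhs => rw [altGo]
    congr 1
    split_ifs <;> omega

-- B's stage-1 fold builds exactly the recursive run-length encoding
theorem foldl_rleStep (l : List Int) :
    ∀ (rs : List (Int × Int)) (v c : Int),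
    l.foldl rleStep (rs ++ [(v, c)])
      = rs ++ [(v, c + (l.takeWhile (fun y => y == v)).length)]
          ++ rle (l.dropWhile (fun y => y == v)) := by
  induction l with
  | nil => intro rs v c; simp [rle]
  | cons y ys ih =>
    intro rs v c
    by_cases hyv : y = v
    · subst hyv
      have hlast : (rs ++ [(y, c)]).getLast? = some (y, c) := by
        simp [List.getLast?_append]
      simp only [List.foldl_cons, rleStep, hlast,
        List.dropLast_concat, List.takeWhile_cons, List.dropWhile_cons,
        beq_self_eq_true, if_pos trivial, List.length_cons]
      rw [ih rs y (c + 1)]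
      have hc : c + 1 + ((ys.takeWhile (fun y' => y' == y)).length : Int)
          = c + (1 + ((ys.takeWhile (fun y' => y' == y)).length : Int)) := by ring
      rw [hc]
      push_cast
      ring_nf
    · have hb : (y == v) = false := by simp [hyv]
      have hlast : (rs ++ [(v, c)]).getLast? = some (v, c) := by
        simp [List.getLast?_append]
      have hne : ¬ (v = y) := fun h => hyv h.symm
      simp only [List.foldl_cons, rleStep, hlast, if_neg hne,
        List.takeWhile_cons, List.dropWhile_cons, hb, Bool.false_eq_true,
        if_false, List.length_nil, Nat.cast_zero, add_zero]
      rw [show rs ++ [(v, c)] ++ [(y, 1)] = (rs ++ [(v, c)]) ++ [(y, 1)] by simp,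
        ih (rs ++ [(v, c)]) y 1]
      conv_rhs => rw [rle]
      simp

-- altGo equals folding max over the counts of the run-length encoding
theorem altGo_rle (l : List Int) : ∀ (best : Int),
    altGo l best = ((rle l).map Prod.snd).foldl max best := by
  induction l using rle.induct with
  | case1 => intro best; simp [altGo, rle]
  | case2 x xs ih =>
    intro best
    rw [altGo, rle]
    simp only [List.map_cons, List.foldl_cons]
    rw [ih]
    congr 1
    split_ifs <;> omega

theorem B_altGo (nums : List Int) : slidingWindowVariable_alt nums = altGo nums 0 := by
  cases nums with
  | nil => simp [slidingWindowVariable_alt, altGo]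
  | cons x xs =>
    unfold slidingWindowVariable_alt
    rw [List.foldl_cons, show rleStep [] x = [] ++ [(x, 1)] from rfl,
      foldl_rleStep xs [] x 1, altGo_rle]
    conv_rhs => rw [rle]
    simp

-- ===== VERDICT (by name: the statement is the Claim_ definition above) =====
theorem slidingWindowVariable_spec : Claim_equal_slidingWindowVariable := by
  intro nums _
  unfold Spec_slidingWindowVariable
  rw [A_altGo, B_altGo]
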